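-- pv_equiv track=rewrite | github.com/shen2255678/destiny | astro-service/psychology.py | evaluate_planet_dignity
-- ===== SOURCE A (Python) =====
-- from typing import Any, Dict, List, Optional
--
-- ESSENTIAL_DIGNITIES: Dict[str, Dict[str, List[str]]] = {
--     "Sun":   {"Dignity": ["leo"],               "Exaltation": ["aries"],
--               "Detriment": ["aquarius"],         "Fall": ["libra"]},
--     "Moon":  {"Dignity": ["cancer"],            "Exaltation": ["taurus"],
--               "Detriment": ["capricorn"],        "Fall": ["scorpio"]},
--     "Venus": {"Dignity": ["taurus", "libra"],   "Exaltation": ["pisces"],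
--               "Detriment": ["scorpio", "aries"], "Fall": ["virgo"]},
--     "Mars":  {"Dignity": ["aries", "scorpio"],  "Exaltation": ["capricorn"],
--               "Detriment": ["libra", "taurus"],  "Fall": ["cancer"]},
-- }
--
-- def evaluate_planet_dignity(planet_name: str, sign_name: str) -> str:
--     """Return the essential dignity state of a planet in a sign.
--
--     Returns: "Dignity" | "Exaltation" | "Detriment" | "Fall" | "Peregrine"
--     Unknown planet or sign -> "Peregrine" (never crashes).
--     sign_name accepts lowercase ("scorpio") or title-case ("Scorpio").
--     """
--     planet_data = ESSENTIAL_DIGNITIES.get(planet_name)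
--     if not planet_data:
--         return "Peregrine"
--     sign_lower = sign_name.lower() if sign_name else ""
--     for state, signs in planet_data.items():
--         if sign_lower in signs:
--             return state
--     return "Peregrine"
-- ===== SOURCE B (Python) =====
-- from typing import Dict, Tuple
--
-- KNOWN_PLANETS: Tuple[str, ...] = ("Sun", "Moon", "Venus", "Mars")
--
-- # Flat literal table: (planet, lowercase sign) -> dignity state.
-- DIGNITY_TABLE: Dict[Tuple[str, str], str] = {
--     ("Sun", "leo"): "Dignity",
--     ("Sun", "aries"): "Exaltation",
--     ("Sun", "aquarius"): "Detriment",
--     ("Sun", "libra"): "Fall",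
--     ("Moon", "cancer"): "Dignity",
--     ("Moon", "taurus"): "Exaltation",
--     ("Moon", "capricorn"): "Detriment",
--     ("Moon", "scorpio"): "Fall",
--     ("Venus", "taurus"): "Dignity",
--     ("Venus", "libra"): "Dignity",
--     ("Venus", "pisces"): "Exaltation",
--     ("Venus", "scorpio"): "Detriment",
--     ("Venus", "aries"): "Detriment",
--     ("Venus", "virgo"): "Fall",
--     ("Mars", "aries"): "Dignity",
--     ("Mars", "scorpio"): "Dignity",
--     ("Mars", "capricorn"): "Exaltation",
--     ("Mars", "libra"): "Detriment",
--     ("Mars", "taurus"): "Detriment",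
--     ("Mars", "cancer"): "Fall",
-- }
--
-- def evaluate_planet_dignity(planet_name: str, sign_name: str) -> str:
--     if planet_name not in KNOWN_PLANETS:
--         return "Peregrine"
--     sign_lower = sign_name.lower() if sign_name else ""
--     return DIGNITY_TABLE.get((planet_name, sign_lower), "Peregrine")
-- ===== Notes on version B (the rewrite author's own statement) =====
-- stated objective: idiomatic
-- what changed: Replaces the nested dict plus per-call loop over dignity states (with an inner sign-membership scan) by a flat literal table keyed by (planet, lowercase sign), so each query is a planet-name guard plus one table lookup with no loop.
import Mathlib
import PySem

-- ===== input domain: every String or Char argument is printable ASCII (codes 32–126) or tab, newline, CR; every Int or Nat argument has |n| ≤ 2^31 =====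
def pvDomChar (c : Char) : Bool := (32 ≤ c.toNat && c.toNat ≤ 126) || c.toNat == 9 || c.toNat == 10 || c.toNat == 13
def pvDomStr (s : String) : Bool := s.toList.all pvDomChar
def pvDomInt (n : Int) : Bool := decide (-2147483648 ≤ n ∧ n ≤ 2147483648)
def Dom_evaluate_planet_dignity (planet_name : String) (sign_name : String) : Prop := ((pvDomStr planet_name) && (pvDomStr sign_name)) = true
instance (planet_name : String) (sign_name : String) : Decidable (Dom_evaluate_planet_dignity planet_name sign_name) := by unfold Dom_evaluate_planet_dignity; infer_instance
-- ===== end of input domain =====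

-- B replaces A's nested dict + per-state loop by a flat literal (planet, sign) -> state table (idiomatic); no loop per query.


-- ===== PORT A =====
def ESSENTIAL_DIGNITIES : PySem.Dict String (PySem.Dict String (List String)) :=
  PySem.Dict.mk
    [ ("Sun",   PySem.Dict.mk [("Dignity", ["leo"]),              ("Exaltation", ["aries"]),
                               ("Detriment", ["aquarius"]),        ("Fall", ["libra"])]),
      ("Moon",  PySem.Dict.mk [("Dignity", ["cancer"]),           ("Exaltation", ["taurus"]),
                               ("Detriment", ["capricorn"]),       ("Fall", ["scorpio"])]),
      ("Venus", PySem.Dict.mk [("Dignity", ["taurus", "libra"]),  ("Exaltation", ["pisces"]),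
                               ("Detriment", ["scorpio", "aries"]),("Fall", ["virgo"])]),
      ("Mars",  PySem.Dict.mk [("Dignity", ["aries", "scorpio"]), ("Exaltation", ["capricorn"]),
                               ("Detriment", ["libra", "taurus"]), ("Fall", ["cancer"])]) ]

-- the 'for state, signs in planet_data.items(): if sign_lower in signs: return state' loop
def dignityLoop : List (String × List String) → String → String
  | [], _ => "Peregrine"
  | (state, signs) :: rest, sl => if signs.contains sl then state else dignityLoop rest sl

def evaluate_planet_dignity (planet_name : String) (sign_name : String) : String :=
  match ESSENTIAL_DIGNITIES.get? planet_name with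
  | none => "Peregrine"
  | some planet_data =>
    -- 'if not planet_data' is also true for an empty dict
    if planet_data.items.isEmpty then "Peregrine"
    else
      let sign_lower := if sign_name.toList.isEmpty then "" else PySem.Str.lower sign_name
      dignityLoop planet_data.items sign_lower

-- ===== PORT B =====
def KNOWN_PLANETS : List String := ["Sun", "Moon", "Venus", "Mars"]

-- flat literal table, written out in Source B
def DIGNITY_TABLE : PySem.Dict (String × String) String :=
  PySem.Dict.mk
    [(("Sun", "leo"), "Dignity"), (("Sun", "aries"), "Exaltation"), (("Sun", "aquarius"), "Detriment"),
     (("Sun", "libra"), "Fall"), (("Moon", "cancer"), "Dignity"), (("Moon", "taurus"), "Exaltation"),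
     (("Moon", "capricorn"), "Detriment"), (("Moon", "scorpio"), "Fall"), (("Venus", "taurus"), "Dignity"),
     (("Venus", "libra"), "Dignity"), (("Venus", "pisces"), "Exaltation"),
     (("Venus", "scorpio"), "Detriment"), (("Venus", "aries"), "Detriment"), (("Venus", "virgo"), "Fall"),
     (("Mars", "aries"), "Dignity"), (("Mars", "scorpio"), "Dignity"),
     (("Mars", "capricorn"), "Exaltation"), (("Mars", "libra"), "Detriment"),
     (("Mars", "taurus"), "Detriment"), (("Mars", "cancer"), "Fall")]

def evaluate_planet_dignity_alt (planet_name : String) (sign_name : String) : String :=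
  if ¬ KNOWN_PLANETS.contains planet_name then "Peregrine"
  else
    let sign_lower := if sign_name.toList.isEmpty then "" else PySem.Str.lower sign_name
    DIGNITY_TABLE.getD (planet_name, sign_lower) "Peregrine"

-- ===== PRECONDITION & SPEC =====
def Spec_evaluate_planet_dignity (planet_name : String) (sign_name : String) (out : String) : Prop := out = evaluate_planet_dignity_alt planet_name sign_name
instance (planet_name : String) (sign_name : String) (out : String) : Decidable (Spec_evaluate_planet_dignity planet_name sign_name out) := by unfold Spec_evaluate_planet_dignity; infer_instance

-- ===== CLAIM (what is proved, stated in full; the proofs are below) =====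
def Claim_equal_evaluate_planet_dignity : Prop := ∀ (planet_name : String) (sign_name : String), Dom_evaluate_planet_dignity planet_name sign_name → Spec_evaluate_planet_dignity planet_name sign_name (evaluate_planet_dignity planet_name sign_name)

-- ===== LEMMAS AND PROOFS =====

theorem dignityLoop_nil (sl : String) : dignityLoop [] sl = "Peregrine" := rfl
theorem dignityLoop_cons (state : String) (signs : List String) (rest : List (String × List String)) (sl : String) :
    dignityLoop ((state, signs) :: rest) sl = if signs.contains sl then state else dignityLoop rest sl := rfl

-- per-planet agreement: the state loop over that planet's items equals the flat-table lookup
theorem loop_eq_lookup_sun (sl : String) :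
    dignityLoop [("Dignity", ["leo"]), ("Exaltation", ["aries"]), ("Detriment", ["aquarius"]), ("Fall", ["libra"])] sl
      = DIGNITY_TABLE.getD ("Sun", sl) "Peregrine" := by
  by_cases h1 : sl = "leo"
  · subst h1; decide
  by_cases h2 : sl = "aries"
  · subst h2; decide
  by_cases h3 : sl = "aquarius"
  · subst h3; decide
  by_cases h4 : sl = "libra"
  · subst h4; decide
  · simp [dignityLoop_nil, dignityLoop_cons, PySem.Dict.getD, PySem.Dict.get?, DIGNITY_TABLE, Prod.mk.injEq, Ne.symm h1, Ne.symm h2, Ne.symm h3, Ne.symm h4, h1, h2, h3, h4]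

theorem loop_eq_lookup_moon (sl : String) :
    dignityLoop [("Dignity", ["cancer"]), ("Exaltation", ["taurus"]), ("Detriment", ["capricorn"]), ("Fall", ["scorpio"])] sl
      = DIGNITY_TABLE.getD ("Moon", sl) "Peregrine" := by
  by_cases h1 : sl = "cancer"
  · subst h1; decide
  by_cases h2 : sl = "taurus"
  · subst h2; decide
  by_cases h3 : sl = "capricorn"
  · subst h3; decide
  by_cases h4 : sl = "scorpio"
  · subst h4; decide
  · simp [dignityLoop_nil, dignityLoop_cons, PySem.Dict.getD, PySem.Dict.get?, DIGNITY_TABLE, Prod.mk.injEq, Ne.symm h1, Ne.symm h2, Ne.symm h3, Ne.symm h4, h1, h2, h3, h4]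

theorem loop_eq_lookup_venus (sl : String) :
    dignityLoop [("Dignity", ["taurus", "libra"]), ("Exaltation", ["pisces"]), ("Detriment", ["scorpio", "aries"]), ("Fall", ["virgo"])] sl
      = DIGNITY_TABLE.getD ("Venus", sl) "Peregrine" := by
  by_cases h1 : sl = "taurus"
  · subst h1; decide
  by_cases h2 : sl = "libra"
  · subst h2; decide
  by_cases h3 : sl = "pisces"
  · subst h3; decide
  by_cases h4 : sl = "scorpio"
  · subst h4; decide
  by_cases h5 : sl = "aries"
  · subst h5; decide
  by_cases h6 : sl = "virgo"
  · subst h6; decide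
  · simp [dignityLoop_nil, dignityLoop_cons, PySem.Dict.getD, PySem.Dict.get?, DIGNITY_TABLE, Prod.mk.injEq, Ne.symm h1, Ne.symm h2, Ne.symm h3, Ne.symm h4, Ne.symm h5, Ne.symm h6, h1, h2, h3, h4, h5, h6]

theorem loop_eq_lookup_mars (sl : String) :
    dignityLoop [("Dignity", ["aries", "scorpio"]), ("Exaltation", ["capricorn"]), ("Detriment", ["libra", "taurus"]), ("Fall", ["cancer"])] sl
      = DIGNITY_TABLE.getD ("Mars", sl) "Peregrine" := by
  by_cases h1 : sl = "aries"
  · subst h1; decide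
  by_cases h2 : sl = "scorpio"
  · subst h2; decide
  by_cases h3 : sl = "capricorn"
  · subst h3; decide
  by_cases h4 : sl = "libra"
  · subst h4; decide
  by_cases h5 : sl = "taurus"
  · subst h5; decide
  by_cases h6 : sl = "cancer"
  · subst h6; decide
  · simp [dignityLoop_nil, dignityLoop_cons, PySem.Dict.getD, PySem.Dict.get?, DIGNITY_TABLE, Prod.mk.injEq, Ne.symm h1, Ne.symm h2, Ne.symm h3, Ne.symm h4, Ne.symm h5, Ne.symm h6, h1, h2, h3, h4, h5, h6]

-- ===== VERDICT (by name: the statement is the Claim_ definition above) =====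
theorem evaluate_planet_dignity_spec : Claim_equal_evaluate_planet_dignity := by
  intro p s _
  unfold Spec_evaluate_planet_dignity evaluate_planet_dignity evaluate_planet_dignity_alt
  by_cases h1 : p = "Sun"
  · subst h1
    simpa [ESSENTIAL_DIGNITIES, KNOWN_PLANETS, PySem.Dict.get?]
      using loop_eq_lookup_sun (if s.toList.isEmpty then "" else PySem.Str.lower s)
  by_cases h2 : p = "Moon"
  · subst h2
    simpa [ESSENTIAL_DIGNITIES, KNOWN_PLANETS, PySem.Dict.get?]
      using loop_eq_lookup_moon (if s.toList.isEmpty then "" else PySem.Str.lower s)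
  by_cases h3 : p = "Venus"
  · subst h3
    simpa [ESSENTIAL_DIGNITIES, KNOWN_PLANETS, PySem.Dict.get?]
      using loop_eq_lookup_venus (if s.toList.isEmpty then "" else PySem.Str.lower s)
  by_cases h4 : p = "Mars"
  · subst h4
    simpa [ESSENTIAL_DIGNITIES, KNOWN_PLANETS, PySem.Dict.get?]
      using loop_eq_lookup_mars (if s.toList.isEmpty then "" else PySem.Str.lower s)
  · have hget : ESSENTIAL_DIGNITIES.get? p = none := by
      simp [ESSENTIAL_DIGNITIES, PySem.Dict.get?, Ne.symm h1, Ne.symm h2, Ne.symm h3, Ne.symm h4]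
    rw [hget]
    simp [KNOWN_PLANETS, h1, h2, h3, h4]
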